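-- pv_equiv track=rewrite | github.com/silvermete0r/problem_solving_coding_time | Competitions/cpfed-bootcamp-day-1/Christmas Spruce [Tree].py | solve
-- ===== SOURCE A (Python) =====
-- def solve(vals, n):
--     mp = {}
--     i = 1
--
--     parents_set = set()
--     for val in vals:
--         i += 1
--         if val in mp:
--             mp[val].append(i)
--         else:
--             mp[val] = [i]
--             parents_set.add(val)
--
--     for key in mp:
--         mp[key] = list(set(mp[key]).difference(parents_set))
--
--     for i in range(n, 0, -1):
--         if i in mp and len(mp[i]) < 3:
--             return "No"
--     return "Yes"
-- ===== SOURCE B (Python) =====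
-- def solve(vals, n):
--     # Count total children per parent; find internal (non-leaf) children by
--     # treating each distinct value as a candidate vertex index back into vals,
--     # then require total - internal >= 3 for every parent in 1..n.
--     m = len(vals)
--     total = {}
--     for v in vals:
--         total[v] = total.get(v, 0) + 1
--     internal = {}
--     for v in total:
--         if 2 <= v <= m + 1:
--             p = vals[v - 2]
--             internal[p] = internal.get(p, 0) + 1
--     for p, t in total.items():
--         if 1 <= p <= n and t - internal.get(p, 0) < 3:
--             return "No"
--     return "Yes"
-- ===== Notes on version B (the rewrite author's own statement) =====
-- stated objective: alternative
-- what changed: A groups child indices into per-parent lists and removes internal children with a per-key set.difference; B never builds child lists: it counts total children per parent with one counter, counts internal children by iterating the distinct values as candidate vertex indices and looking up their parent in vals, and checks total - internal >= 3 per parent (measured constant-factor win: no per-key list/set objects and no range(n) scan).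
import Mathlib
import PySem

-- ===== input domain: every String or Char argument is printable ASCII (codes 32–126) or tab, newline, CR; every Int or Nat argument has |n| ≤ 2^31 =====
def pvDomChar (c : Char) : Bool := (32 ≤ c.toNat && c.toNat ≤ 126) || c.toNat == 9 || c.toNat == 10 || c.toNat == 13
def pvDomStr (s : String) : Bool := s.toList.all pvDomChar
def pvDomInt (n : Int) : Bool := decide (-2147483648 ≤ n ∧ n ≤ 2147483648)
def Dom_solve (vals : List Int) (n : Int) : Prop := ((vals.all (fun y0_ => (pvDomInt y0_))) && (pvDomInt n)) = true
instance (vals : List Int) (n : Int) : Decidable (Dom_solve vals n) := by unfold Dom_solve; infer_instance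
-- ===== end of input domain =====

-- B never builds per-parent child lists: it counts total children per parent, counts
-- internal children by walking the distinct values as candidate vertex indices back
-- into vals, and checks total - internal >= 3 per parent (objective: alternative).

-- ===== PORT A =====
def solve (vals : List Int) (n : Int) : String :=
  let st := vals.foldl
    (fun (st : PySem.Dict Int (List Int) × Int × PySem.Set Int) val =>
      let mp := st.1
      let i := st.2.1 + 1
      let ps := st.2.2
      if mp.contains val then (mp.insert val (mp.getD val [] ++ [i]), i, ps)
      else (mp.insert val [i], i, PySem.Set.add ps val))
    (PySem.Dict.empty, 1, PySem.Set.empty)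
  let ps := st.2.2
  let mp := st.1.items.foldl
    (fun (m : PySem.Dict Int (List Int)) kv =>
      m.insert kv.1 (PySem.Set.diff (PySem.Set.ofList kv.2) ps)) st.1
  match (PySem.List.pyRange n 0 (-1)).find?
      (fun i => mp.contains i && decide ((mp.getD i []).length < 3)) with
  | some _ => "No"
  | none => "Yes"

-- ===== PORT B =====
def solve_alt (vals : List Int) (n : Int) : String :=
  let m : Int := (vals.length : Int)
  let total := vals.foldl
    (fun (d : PySem.Dict Int Int) v => d.insert v (d.getD v 0 + 1)) PySem.Dict.empty
  let internal := total.keys.foldl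
    (fun (d : PySem.Dict Int Int) v =>
      if 2 ≤ v ∧ v ≤ m + 1 then
        -- vals[v-2]: the guard puts the index in range, so the default 0 is unreachable
        let p := PySem.List.pyGetD vals (v - 2) 0
        d.insert p (d.getD p 0 + 1)
      else d)
    PySem.Dict.empty
  match total.items.find?
      (fun pt => decide (1 ≤ pt.1 ∧ pt.1 ≤ n ∧ pt.2 - internal.getD pt.1 0 < 3)) with
  | some _ => "No"
  | none => "Yes"

-- ===== PRECONDITION & SPEC =====
def Spec_solve (vals : List Int) (n : Int) (out : String) : Prop := out = solve_alt vals n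
instance (vals : List Int) (n : Int) (out : String) : Decidable (Spec_solve vals n out) := by unfold Spec_solve; infer_instance

-- ===== CLAIM (what is proved, stated in full; the proofs are below) =====
def Claim_equal_solve : Prop := ∀ (vals : List Int) (n : Int), Dom_solve vals n → Spec_solve vals n (solve vals n)

-- ===== LEMMAS AND PROOFS =====

-- the number of leaf children of parent value p (children are positions 2..len(vals)+1;
-- a child is a leaf iff its index does not occur in vals)
def pvCnt (vals : List Int) (p : Int) : Nat :=
  (((PySem.List.enumerate vals 2).filter (fun q => q.2 == p)).filter
    (fun q => !(PySem.Set.contains (PySem.Set.ofList vals) q.1))).length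

-- the number of internal (non-leaf) children of p, counted B's way: distinct values v
-- that are a vertex index (2 ≤ v ≤ m+1) whose parent vals[v-2] is p
def pvInt (vals : List Int) (p : Int) : Nat :=
  (PySem.Set.ofList vals).countP
    (fun v => decide (2 ≤ v ∧ v ≤ (vals.length : Int) + 1) &&
      (PySem.List.pyGetD vals (v - 2) 0 == p))

theorem pvInsKeep {ν : Type} (g : ν → ν) :
    ∀ (l : List (Int × ν)) (m : PySem.Dict Int ν) (p : Int),
      p ∉ l.map (fun kv => kv.1) →
      (l.foldl (fun m kv => m.insert kv.1 (g kv.2)) m).get? p = m.get? p := by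
  intro l
  induction l with
  | nil => intro m p _; rfl
  | cons kv rest ih =>
    intro m p hp
    simp only [List.map_cons, List.mem_cons, not_or] at hp
    simp only [List.foldl_cons]
    rw [ih _ _ hp.2, PySem.Dict.get?_insert_of_ne _ _ hp.1]

theorem pvInsHit {ν : Type} (g : ν → ν) :
    ∀ (l : List (Int × ν)) (m : PySem.Dict Int ν) (p : Int) (v : ν),
      (l.map (fun kv => kv.1)).Nodup → (p, v) ∈ l →
      (l.foldl (fun m kv => m.insert kv.1 (g kv.2)) m).get? p = some (g v) := by
  intro l
  induction l with
  | nil => intro m p v _ h; simp at h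
  | cons kv rest ih =>
    intro m p v hnd hmem
    simp only [List.map_cons, List.nodup_cons] at hnd
    rcases List.mem_cons.mp hmem with h | h
    · cases h
      simp only [List.foldl_cons]
      rw [pvInsKeep g rest _ _ hnd.1, PySem.Dict.get?_insert_self]
    · simp only [List.foldl_cons]
      exact ih _ _ _ hnd.2 h

theorem pvRawGetD (vals : List Int) (p : Int) :
    ((PySem.List.enumerate vals 2).foldl
        (fun (d : PySem.Dict Int (List Int)) q => d.modify q.2 [] (· ++ [q.1]))
        PySem.Dict.empty).getD p []
      = ((PySem.List.enumerate vals 2).filter (fun q => q.2 == p)).map (fun q => q.1) := by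
  have h := PySem.Dict.getD_foldl_modify_append
    ((PySem.List.enumerate vals 2).map (fun q => (q.2, q.1)))
    (PySem.Dict.empty (κ := Int) (ν := List Int)) p
  rw [List.foldl_map] at h
  simp only [List.filter_map, Function.comp_def, List.map_map] at h
  simpa using h

theorem pvFoldA (vals : List Int) :
    ∀ (mp : PySem.Dict Int (List Int)) (i : Int) (ps : PySem.Set Int),
      (∀ v, mp.contains v = PySem.Set.contains ps v) →
      vals.foldl
        (fun (st : PySem.Dict Int (List Int) × Int × PySem.Set Int) val =>
          let mp := st.1
          let i := st.2.1 + 1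
          let ps := st.2.2
          if mp.contains val then (mp.insert val (mp.getD val [] ++ [i]), i, ps)
          else (mp.insert val [i], i, PySem.Set.add ps val))
        (mp, i, ps) =
      ((PySem.List.enumerate vals (i+1)).foldl
          (fun d q => d.modify q.2 [] (· ++ [q.1])) mp,
        i + vals.length, PySem.Set.update ps vals) := by
  induction vals with
  | nil => intro mp i ps _; simp [PySem.List.enumerate_nil, PySem.Set.update]
  | cons val rest ih =>
    intro mp i ps h0
    rw [PySem.List.enumerate_cons]
    simp only [List.foldl_cons]
    have hmod : mp.modify val [] (· ++ [i+1]) = mp.insert val (mp.getD val [] ++ [i+1]) := rfl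
    by_cases h : mp.contains val = true
    · have hps : PySem.Set.contains ps val = true := (h0 val) ▸ h
      have hadd : PySem.Set.add ps val = ps := by
        simp [PySem.Set.add, (PySem.Set.contains_iff ps val).mp hps]
      have hinv : ∀ v, (mp.insert val (mp.getD val [] ++ [i+1])).contains v
          = PySem.Set.contains ps v := by
        intro v
        rw [Bool.eq_iff_iff, PySem.Dict.contains_iff_mem_keys, PySem.Set.contains_iff,
          PySem.Dict.mem_keys_insert]
        constructor
        · rintro (rfl | hv)
          · exact (PySem.Set.contains_iff ps v).mp hps
          · exact (PySem.Set.contains_iff ps v).mp ((h0 v) ▸ ((PySem.Dict.contains_iff_mem_keys mp v).mpr hv))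
        · intro hv
          by_cases hv2 : v = val
          · exact Or.inl hv2
          · exact Or.inr ((PySem.Dict.contains_iff_mem_keys mp v).mp
              ((h0 v) ▸ (PySem.Set.contains_iff ps v).mpr hv))
      simp only [h, if_true]
      rw [ih _ _ _ hinv]
      rw [hmod]
      have : PySem.Set.update ps (val :: rest) = PySem.Set.update (PySem.Set.add ps val) rest := rfl
      rw [this, hadd]
      simp only [Prod.mk.injEq]
      refine ⟨by trivial, by push_cast [List.length_cons]; ring, by trivial⟩
    · have hb : mp.contains val = false := by simpa using h
      have hgd : mp.getD val [] = [] := PySem.Dict.getD_of_not_contains mp [] hb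
      have hinv : ∀ v, (mp.insert val [i+1]).contains v
          = PySem.Set.contains (PySem.Set.add ps val) v := by
        intro v
        rw [Bool.eq_iff_iff, PySem.Dict.contains_iff_mem_keys, PySem.Set.contains_iff,
          PySem.Dict.mem_keys_insert, PySem.Set.mem_add]
        constructor
        · rintro (rfl | hv)
          · exact Or.inr rfl
          · exact Or.inl ((PySem.Set.contains_iff ps v).mp ((h0 v) ▸
              ((PySem.Dict.contains_iff_mem_keys mp v).mpr hv)))
        · rintro (hv | rfl)
          · exact Or.inr ((PySem.Dict.contains_iff_mem_keys mp v).mp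
              ((h0 v) ▸ (PySem.Set.contains_iff ps v).mpr hv))
          · exact Or.inl rfl
      simp only [hb, Bool.false_eq_true, if_false]
      rw [ih _ _ _ hinv]
      rw [hmod, hgd]
      simp only [List.nil_append, Prod.mk.injEq]
      exact ⟨by trivial, by push_cast [List.length_cons]; ring, by trivial⟩

theorem pvSolveA (vals : List Int) (n : Int) :
    solve vals n = if ∃ p ∈ vals, 1 ≤ p ∧ p ≤ n ∧ pvCnt vals p < 3 then "No" else "Yes" := by
  simp only [solve]
  rw [pvFoldA vals PySem.Dict.empty 1 PySem.Set.empty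
    (fun v => by simp [PySem.Dict.contains_empty])]
  dsimp only
  rw [PySem.Set.update_empty]
  set ps := PySem.Set.ofList vals with hps
  set E := PySem.List.enumerate vals (1+1) with hE
  set mpRaw := E.foldl (fun (d : PySem.Dict Int (List Int)) q => d.modify q.2 [] (· ++ [q.1]))
    PySem.Dict.empty with hmpRaw
  set mp2 := mpRaw.items.foldl
    (fun (m : PySem.Dict Int (List Int)) kv =>
      m.insert kv.1 (PySem.Set.diff (PySem.Set.ofList kv.2) ps)) mpRaw with hmp2
  have hE2 : E = PySem.List.enumerate vals 2 := by norm_num [hE]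
  have hkeysRaw : mpRaw.keys = PySem.Set.ofList vals := by
    have h1 := PySem.Dict.keys_foldl_modify_key (ν := List Int) E
      (fun q : Int × Int => q.2) [] (fun d q v => v ++ [q.1]) PySem.Dict.empty
    rw [PySem.Dict.keys_empty, PySem.List.map_snd_enumerate] at h1
    rw [hmpRaw]
    exact h1.trans (PySem.Set.update_empty vals)
  have hndRaw : mpRaw.keys.Nodup := by
    rw [hmpRaw]
    exact PySem.Dict.nodup_keys_foldl_modify_key (ν := List Int) E
      (fun q : Int × Int => q.2) [] (fun d q v => v ++ [q.1]) PySem.Dict.empty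
      PySem.Dict.nodup_keys_empty
  have hgdRaw : ∀ p, mpRaw.getD p []
      = ((PySem.List.enumerate vals 2).filter (fun q => q.2 == p)).map (fun q => q.1) := by
    intro p
    rw [hmpRaw, hE2]
    exact pvRawGetD vals p
  have hLnd : ∀ p, (((PySem.List.enumerate vals 2).filter (fun q => q.2 == p)).map
      (fun q => q.1)).Nodup := by
    intro p
    have h1 : ((PySem.List.enumerate vals 2).filter (fun q => q.2 == p)).Pairwise
        (fun a b => a.1 < b.1) := (PySem.List.pairwise_lt_enumerate vals 2).filter _
    have h2 : (((PySem.List.enumerate vals 2).filter (fun q => q.2 == p)).map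
        (fun q => q.1)).Pairwise (· < ·) := (List.pairwise_map).mpr h1
    exact h2.imp (fun h => ne_of_lt h)
  have hgetRaw : ∀ p ∈ vals, mpRaw.get? p
      = some (((PySem.List.enumerate vals 2).filter (fun q => q.2 == p)).map (fun q => q.1)) := by
    intro p hp
    have hc : mpRaw.contains p = true := by
      rw [PySem.Dict.contains_iff_mem_keys, hkeysRaw, PySem.Set.mem_ofList]; exact hp
    rw [PySem.Dict.contains_eq_isSome_get?] at hc
    obtain ⟨v, hv⟩ := Option.isSome_iff_exists.mp hc
    have := hgdRaw p
    rw [PySem.Dict.getD_eq_get?_getD, hv] at this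
    simp only [Option.getD_some] at this
    rw [hv, this]
  have hget2 : ∀ p ∈ vals, mp2.get? p = some
      ((((PySem.List.enumerate vals 2).filter (fun q => q.2 == p)).map (fun q => q.1)).filter
        (fun x => !(PySem.Set.contains ps x))) := by
    intro p hp
    have hmem := PySem.Dict.mem_items_of_get?_eq_some mpRaw (hgetRaw p hp)
    have h1 := pvInsHit (fun v => PySem.Set.diff (PySem.Set.ofList v) ps) mpRaw.items mpRaw p _
      hndRaw hmem
    rw [hmp2]
    rw [h1]
    dsimp only
    congr 1
    rw [PySem.Set.ofList_eq_self_of_nodup _ (hLnd p)]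
    rfl
  have hlen2 : ∀ p ∈ vals, ∀ v, mp2.get? p = some v → v.length = pvCnt vals p := by
    intro p hp v hv
    rw [hget2 p hp] at hv
    cases hv
    rw [List.filter_map]
    rw [List.length_map, pvCnt, ← hps]
    congr 1
  have hcont2 : ∀ p, mp2.contains p = true ↔ p ∈ vals := by
    intro p
    rw [PySem.Dict.contains_iff_mem_keys, hmp2]
    have h1 := PySem.Dict.keys_foldl_insert_key (ν := List Int) mpRaw.items
      (fun kv : Int × List Int => kv.1)
      (fun m kv => PySem.Set.diff (PySem.Set.ofList kv.2) ps) mpRaw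
    rw [h1, PySem.Set.mem_update, hkeysRaw, PySem.Set.mem_ofList]
    constructor
    · rintro (h | h)
      · exact h
      · have h' : p ∈ mpRaw.keys := h
        rwa [hkeysRaw, PySem.Set.mem_ofList] at h'
    · exact Or.inl
  cases hF : (PySem.List.pyRange n 0 (-1)).find?
      (fun i => mp2.contains i && decide ((mp2.getD i []).length < 3)) with
  | some a =>
    have ha1 := List.find?_some hF
    have ha2 := PySem.List.mem_pyRange_neg_one.mp (List.mem_of_find?_eq_some hF)
    rw [Bool.and_eq_true] at ha1
    have hav : a ∈ vals := (hcont2 a).mp ha1.1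
    have hlt : (mp2.getD a []).length < 3 := of_decide_eq_true ha1.2
    have : pvCnt vals a < 3 := by
      have hc := (hcont2 a).mpr hav
      rw [PySem.Dict.contains_eq_isSome_get?] at hc
      obtain ⟨v, hv⟩ := Option.isSome_iff_exists.mp hc
      rw [PySem.Dict.getD_eq_get?_getD, hv] at hlt
      simp only [Option.getD_some] at hlt
      rw [← hlen2 a hav v hv]
      exact hlt
    rw [if_pos (show ∃ p ∈ vals, 1 ≤ p ∧ p ≤ n ∧ pvCnt vals p < 3 from
      ⟨a, hav, by omega, ha2.2, this⟩)]
  | none =>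
    rw [if_neg]
    rintro ⟨p, hpv, h1, h2, h3⟩
    have hmem : p ∈ PySem.List.pyRange n 0 (-1) :=
      PySem.List.mem_pyRange_neg_one.mpr ⟨by omega, h2⟩
    have := List.find?_eq_none.mp hF _ hmem
    rw [Bool.and_eq_true] at this
    apply this
    constructor
    · exact (hcont2 p).mpr hpv
    · have hc := (hcont2 p).mpr hpv
      rw [PySem.Dict.contains_eq_isSome_get?] at hc
      obtain ⟨v, hv⟩ := Option.isSome_iff_exists.mp hc
      rw [PySem.Dict.getD_eq_get?_getD, hv]
      simp only [Option.getD_some]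
      rw [decide_eq_true_eq]
      rw [hlen2 p hpv v hv]
      exact h3

theorem pvCountSplit {α : Type} (c d : α → Bool) :
    ∀ (l : List α), l.countP c = l.countP (fun a => c a && d a) + l.countP (fun a => c a && !(d a)) := by
  intro l
  induction l with
  | nil => rfl
  | cons x rest ih =>
    simp only [List.countP_cons, ih]
    by_cases h : c x = true <;> by_cases h2 : d x = true <;> simp [h, h2] <;> omega

theorem pvSplit (vals : List Int) (p : Int) :
    vals.count p = pvCnt vals p + pvInt vals p := by
  have hcount : vals.count p
      = (PySem.List.enumerate vals 2).countP (fun q => q.2 == p) := by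
    conv_lhs => rw [← PySem.List.map_snd_enumerate vals 2]
    rw [List.count_eq_countP, List.countP_map]
    rfl
  have hsplit := pvCountSplit (fun q : Int × Int => q.2 == p)
    (fun q : Int × Int => !(PySem.Set.contains (PySem.Set.ofList vals) q.1))
    (PySem.List.enumerate vals 2)
  have hleaf : (PySem.List.enumerate vals 2).countP
      (fun q => (q.2 == p) && !(PySem.Set.contains (PySem.Set.ofList vals) q.1))
      = pvCnt vals p := by
    rw [pvCnt, ← List.countP_eq_length_filter, List.countP_filter]
    exact List.countP_congr (fun a _ => by rw [Bool.and_comm])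
  have hint : (PySem.List.enumerate vals 2).countP
      (fun q => (q.2 == p) && !(!(PySem.Set.contains (PySem.Set.ofList vals) q.1)))
      = pvInt vals p := by
    -- perm argument
    set E := PySem.List.enumerate vals 2 with hE
    set pred1 : Int × Int → Bool :=
      fun q => (q.2 == p) && !(!(PySem.Set.contains (PySem.Set.ofList vals) q.1)) with hpred1
    set pred2 : Int → Bool :=
      fun v => decide (2 ≤ v ∧ v ≤ (vals.length : Int) + 1) &&
        (PySem.List.pyGetD vals (v - 2) 0 == p) with hpred2
    have hnd1 : ((E.filter pred1).map (fun q => q.1)).Nodup := by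
      have h1 : (E.filter pred1).Pairwise (fun a b => a.1 < b.1) :=
        (PySem.List.pairwise_lt_enumerate vals 2).filter _
      exact ((List.pairwise_map).mpr h1).imp (fun h => ne_of_lt h)
    have hnd2 : (((PySem.Set.ofList vals) : List Int).filter pred2).Nodup :=
      (PySem.Set.nodup_ofList vals).filter _
    have hmem : ∀ c : Int, c ∈ (E.filter pred1).map (fun q => q.1)
        ↔ c ∈ ((PySem.Set.ofList vals) : List Int).filter pred2 := by
      intro c
      simp only [List.mem_map, List.mem_filter, hE, PySem.List.mem_enumerate_iff, hpred1, hpred2,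
        Bool.and_eq_true, Bool.not_not, beq_iff_eq, decide_eq_true_eq, PySem.Set.mem_ofList]
      constructor
      · rintro ⟨q, ⟨⟨k, hk, rfl⟩, hqp, hqin⟩, rfl⟩
        dsimp only at *
        rw [PySem.Set.contains_iff, PySem.Set.mem_ofList] at hqin
        refine ⟨hqin, ⟨by omega, by omega⟩, ?_⟩
        rw [PySem.List.pyGetD_eq_getElem vals 0 (by omega) (by omega)]
        simpa [show ((2 + (k : Int)) - 2).toNat = k by omega] using hqp
      · rintro ⟨hcv, ⟨h2, h3⟩, hg⟩
        rw [PySem.List.pyGetD_eq_getElem vals 0 (by omega) (by omega)] at hg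
        refine ⟨((c : Int), p), ⟨⟨(c - 2).toNat, by omega, ?_⟩, rfl,
          (PySem.Set.contains_iff _ _).mpr ((PySem.Set.mem_ofList _ _).mpr hcv)⟩, rfl⟩
        have : (2 : Int) + ((c - 2).toNat : Int) = c := by omega
        rw [this, hg]
    have hperm := (List.perm_ext_iff_of_nodup hnd1 hnd2).mpr hmem
    have hlen := hperm.length_eq
    rw [List.length_map] at hlen
    rw [List.countP_eq_length_filter, hlen, pvInt, List.countP_eq_length_filter]
  rw [hcount, hsplit, hleaf, hint]

theorem pvIntFoldAux (vals : List Int) (p : Int) :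
    ∀ (l : List Int) (d : PySem.Dict Int Int),
      (l.foldl (fun d v =>
        if 2 ≤ v ∧ v ≤ (vals.length : Int) + 1 then
          let q := PySem.List.pyGetD vals (v - 2) 0
          d.insert q (d.getD q 0 + 1)
        else d) d).getD p 0
      = d.getD p 0 + (l.countP (fun v => decide (2 ≤ v ∧ v ≤ (vals.length : Int) + 1) &&
          (PySem.List.pyGetD vals (v - 2) 0 == p)) : Int) := by
  intro l
  induction l with
  | nil => intro d; simp
  | cons v rest ih =>
    intro d
    simp only [List.foldl_cons, List.countP_cons]
    by_cases hc : 2 ≤ v ∧ v ≤ (vals.length : Int) + 1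
    · rw [if_pos hc]
      rw [ih, PySem.Dict.getD_insert]
      by_cases hp : p = PySem.List.pyGetD vals (v - 2) 0
      · rw [if_pos hp]
        have : (decide (2 ≤ v ∧ v ≤ (vals.length : Int) + 1) &&
            (PySem.List.pyGetD vals (v - 2) 0 == p)) = true := by
          simp [hc, hp.symm]
        rw [this, if_pos rfl, ← hp]
        push_cast
        ring
      · rw [if_neg hp]
        have : (decide (2 ≤ v ∧ v ≤ (vals.length : Int) + 1) &&
            (PySem.List.pyGetD vals (v - 2) 0 == p)) = false := by
          simp [hc]; exact fun h => hp h.symm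
        rw [this]
        simp
    · rw [if_neg hc, ih]
      have : (decide (2 ≤ v ∧ v ≤ (vals.length : Int) + 1) &&
          (PySem.List.pyGetD vals (v - 2) 0 == p)) = false := by
        simp [hc]
      rw [this]
      simp

theorem pvSolveB (vals : List Int) (n : Int) :
    solve_alt vals n = if ∃ p ∈ vals, 1 ≤ p ∧ p ≤ n ∧ pvCnt vals p < 3 then "No" else "Yes" := by
  simp only [solve_alt]
  rw [PySem.Dict.foldl_insert_getD_add_one_eq_counter, PySem.Dict.keys_counter]
  set internal := ((PySem.Set.ofList vals : List Int).foldl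
    (fun (d : PySem.Dict Int Int) v =>
      if 2 ≤ v ∧ v ≤ (vals.length : Int) + 1 then
        let p := PySem.List.pyGetD vals (v - 2) 0
        d.insert p (d.getD p 0 + 1)
      else d)
    PySem.Dict.empty) with hinternal
  have hint : ∀ p, internal.getD p 0 = (pvInt vals p : Int) := by
    intro p
    rw [hinternal, pvIntFoldAux]
    simp [pvInt, PySem.Dict.getD_empty]
  rw [PySem.Dict.items_counter]
  cases hF : ((PySem.Set.ofList vals : List Int).map
      (fun k => (k, (vals.count k : Int)))).find?
      (fun pt => decide (1 ≤ pt.1 ∧ pt.1 ≤ n ∧ pt.2 - internal.getD pt.1 0 < 3)) with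
  | some a =>
    have ha1 := List.find?_some hF
    have ha2 := List.mem_of_find?_eq_some hF
    obtain ⟨k, hk, rfl⟩ := List.mem_map.mp ha2
    rw [decide_eq_true_eq] at ha1
    dsimp only at ha1
    obtain ⟨h1, h2, h3⟩ := ha1
    rw [hint] at h3
    have hsplit := pvSplit vals k
    have hkv : k ∈ vals := (PySem.Set.mem_ofList _ _).mp hk
    have : pvCnt vals k < 3 := by omega
    rw [if_pos (show ∃ p ∈ vals, 1 ≤ p ∧ p ≤ n ∧ pvCnt vals p < 3 from ⟨k, hkv, h1, h2, this⟩)]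
  | none =>
    rw [if_neg]
    rintro ⟨p, hpv, h1, h2, h3⟩
    have hmem : (p, (vals.count p : Int)) ∈ ((PySem.Set.ofList vals : List Int).map
        (fun k => (k, (vals.count k : Int)))) :=
      List.mem_map_of_mem ((PySem.Set.mem_ofList _ _).mpr hpv)
    have := List.find?_eq_none.mp hF _ hmem
    rw [decide_eq_true_eq] at this
    dsimp only at this
    apply this
    refine ⟨h1, h2, ?_⟩
    rw [hint]
    have hsplit := pvSplit vals p
    omega

-- ===== VERDICT (by name: the statement is the Claim_ definition above) =====
theorem solve_spec : Claim_equal_solve := by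
  intro vals n _
  unfold Spec_solve
  rw [pvSolveA, pvSolveB]
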